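-- pv_equiv track=rewrite | github.com/Arpan243/Oracle | intelligent_substring.py | longest_special_substring
-- ===== SOURCE A (Python) =====
-- def longest_special_substring(s, charValue, k):
--     def is_special(c):
--       index = ord(c) - ord('a')
--       return charValue[index] == '1'
--
--     n = len(s)
--     left = 0
--     normal_count = 0
--     max_len = 0
--
--     for right in range(n):
--         if not is_special(s[right]):
--             normal_count += 1
--
--         while normal_count > k:
--             if not is_special(s[left]):
--                 normal_count -= 1
--             left += 1
--
--         max_len = max(max_len, right - left + 1)
--
--     return max_len
-- ===== SOURCE B (Python) =====
-- def longest_special_substring(s, charValue, k):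
--     def is_special(c):
--         index = ord(c) - ord('a')
--         return charValue[index] == '1'
--
--     pref = [0]
--     for c in s:
--         pref.append(pref[-1] + (0 if is_special(c) else 1))
--     n = len(s)
--     return max((r - l
--                 for r in range(n + 1)
--                 for l in range(r + 1)
--                 if pref[r] - pref[l] <= k),
--                default=0)
-- ===== Notes on version B (the rewrite author's own statement) =====
-- stated objective: alternative
-- what changed: Replaces the sliding-window with a moving left pointer and running normal-count by a prefix-count table followed by a direct maximum over all windows whose normal-character count is at most k.
import Mathlib
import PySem

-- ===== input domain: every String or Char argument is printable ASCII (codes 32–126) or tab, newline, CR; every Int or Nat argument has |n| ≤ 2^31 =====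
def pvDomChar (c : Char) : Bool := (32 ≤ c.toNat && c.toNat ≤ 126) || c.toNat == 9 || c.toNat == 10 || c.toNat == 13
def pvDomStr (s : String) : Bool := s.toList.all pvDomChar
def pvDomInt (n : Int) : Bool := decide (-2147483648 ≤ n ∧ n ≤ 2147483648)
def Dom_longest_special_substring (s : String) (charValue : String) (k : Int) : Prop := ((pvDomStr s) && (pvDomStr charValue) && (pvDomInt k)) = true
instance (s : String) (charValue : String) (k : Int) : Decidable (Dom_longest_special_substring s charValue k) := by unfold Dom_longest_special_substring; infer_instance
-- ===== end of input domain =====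

-- B replaces A's sliding-window left-pointer shrink by a prefix-count table plus a direct
-- maximum over all windows with at most k normal characters (objective: alternative, not faster).

-- ===== PORT A =====
-- shared helper: the nested `is_special` of both Pythons; `none` is where Python raises
-- IndexError (ord(c)-ord('a') outside charValue, incl. negative wraparound) — excluded by Pre_.
def pvIsSpecial (cv : String) (c : Char) : Bool :=
  match PySem.Str.pyGet? cv ((c.toNat : Int) - 97) with
  | some ch => ch == '1'
  | none => false

-- the `while normal_count > k` loop; fuel n+1 is enough on Pre_ (left ≤ n and left increases);
-- the `none` branch of the lookup is where Python raises IndexError (left = n, only for k < 0).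
def pvShrinkA (cs : List Char) (cv : String) (k : Int) : Nat → Nat → Int → Nat × Int
  | 0, left, nc => (left, nc)
  | fuel+1, left, nc =>
    if k < nc then
      let nc' := match PySem.List.pyGet? cs (left : Int) with
        | some c => if pvIsSpecial cv c then nc else nc - 1
        | none => nc
      pvShrinkA cs cv k fuel (left + 1) nc'
    else (left, nc)

def pvStepA (cs : List Char) (cv : String) (k : Int) (st : Nat × Int × Int) (right : Nat) :
    Nat × Int × Int :=
  let nc1 := match PySem.List.pyGet? cs (right : Int) with
    | some c => if pvIsSpecial cv c then st.2.1 else st.2.1 + 1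
    | none => st.2.1
  let p := pvShrinkA cs cv k (cs.length + 1) st.1 nc1
  (p.1, p.2, max st.2.2 ((right : Int) - (p.1 : Int) + 1))

def longest_special_substring (s : String) (charValue : String) (k : Int) : Int :=
  ((List.range s.toList.length).foldl (pvStepA s.toList charValue k) (0, 0, 0)).2.2

-- ===== PORT B =====
def longest_special_substring_alt (s : String) (charValue : String) (k : Int) : Int :=
  let pref := s.toList.foldl
    (fun pr c => pr ++ [PySem.List.pyGetD pr (-1) 0 + (if pvIsSpecial charValue c then 0 else 1)])
    [(0 : Int)]
  let n := s.toList.length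
  let vals := (List.range (n + 1)).flatMap (fun r : Nat =>
    (List.range (r + 1)).filterMap (fun l : Nat =>
      if PySem.List.pyGetD pref (r : Int) 0 - PySem.List.pyGetD pref (l : Int) 0 ≤ k
      then some ((r : Int) - (l : Int)) else none))
  match vals with
  | [] => 0
  | v :: vs => vs.foldl max v

-- ===== PRECONDITION & SPEC =====
-- Pre_ excludes exactly the inputs where Python A raises: a character of s whose index
-- ord(c)-ord('a') is out of range for charValue (IndexError), and k < 0 with s nonempty
-- (the shrink loop runs off the string: IndexError on s[left]).
def Pre_longest_special_substring (s : String) (charValue : String) (k : Int) : Prop :=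
  (s.toList.all (fun c =>
      decide (97 ≤ c.toNat + charValue.toList.length) &&
      decide (c.toNat < 97 + charValue.toList.length)) = true) ∧
  (0 ≤ k ∨ s.toList = [])
instance (s : String) (charValue : String) (k : Int) :
    Decidable (Pre_longest_special_substring s charValue k) := by
  unfold Pre_longest_special_substring; infer_instance

def pvWitness_longest_special_substring : String × String × Int := ("abba", "10", 1)

def Spec_longest_special_substring (s : String) (charValue : String) (k : Int) (out : Int) : Prop := out = longest_special_substring_alt s charValue k
instance (s : String) (charValue : String) (k : Int) (out : Int) : Decidable (Spec_longest_special_substring s charValue k out) := by unfold Spec_longest_special_substring; infer_instance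

-- ===== CLAIM (what is proved, stated in full; the proofs are below) =====
def Claim_equal_longest_special_substring : Prop := ∀ (s : String) (charValue : String) (k : Int), Dom_longest_special_substring s charValue k → Pre_longest_special_substring s charValue k → Spec_longest_special_substring s charValue k (longest_special_substring s charValue k)

-- ===== LEMMAS AND PROOFS =====

-- number of normal (non-special) characters among the first t characters
def pvN (cv : String) (cs : List Char) (t : Nat) : Int :=
  (((cs.take t).countP (fun c => !pvIsSpecial cv c) : Nat) : Int)

-- the least l with (l >= t or) at most k normals in cs[l:t] -- A's left pointer after step t
def pvMinL (cv : String) (cs : List Char) (k : Int) (t : Nat) : Nat :=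
  Nat.find (p := fun l => t <= l ∨ pvN cv cs t - pvN cv cs l ≤ k) ⟨t, Or.inl le_rfl⟩

-- A's max_len after t steps
def pvM (cv : String) (cs : List Char) (k : Int) (t : Nat) : Int :=
  ((List.range (t + 1)).map (fun u : Nat => (u : Int) - (pvMinL cv cs k u : Int))).foldl max 0

lemma pvN_zero (cv : String) (cs : List Char) : pvN cv cs 0 = 0 := by simp [pvN]

lemma pvN_succ (cv : String) (cs : List Char) (t : Nat) (h : t < cs.length) :
    pvN cv cs (t + 1) = pvN cv cs t + (if pvIsSpecial cv cs[t] then 0 else 1) := by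
  rw [pvN, pvN, List.take_add_one, List.getElem?_eq_getElem h]
  simp only [Option.toList_some, List.countP_append, List.countP_cons, List.countP_nil]
  split <;> simp_all

lemma pvN_succ' (cv : String) (cs : List Char) (t : Nat) (c : Char)
    (hc : cs[t]? = some c) :
    pvN cv cs (t + 1) = pvN cv cs t + (if pvIsSpecial cv c then 0 else 1) := by
  rw [pvN, pvN, List.take_add_one, hc]
  simp only [Option.toList_some, List.countP_append, List.countP_cons, List.countP_nil]
  split <;> simp_all

lemma pvN_mono (cv : String) (cs : List Char) {l t : Nat} (h : l ≤ t) :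
    pvN cv cs l ≤ pvN cv cs t := by
  have : cs.take l = (cs.take t).take l := by rw [List.take_take, Nat.min_eq_left h]
  simp only [pvN, this]
  exact_mod_cast List.Sublist.countP_le (p := fun c => !pvIsSpecial cv c) (List.take_sublist _ _)

lemma pvMinL_le (cv : String) (cs : List Char) (k : Int) (t : Nat) :
    pvMinL cv cs k t ≤ t :=
  Nat.find_le (Or.inl le_rfl)

lemma pvMinL_spec (cv : String) (cs : List Char) {k : Int} (hk : 0 ≤ k) (t : Nat) :
    pvN cv cs t - pvN cv cs (pvMinL cv cs k t) ≤ k := by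
  rcases Nat.find_spec (p := fun l => t ≤ l ∨ pvN cv cs t - pvN cv cs l ≤ k) ⟨t, Or.inl le_rfl⟩ with h | h
  · have h2 : pvMinL cv cs k t = t := le_antisymm (Nat.find_le (Or.inl le_rfl)) h
    rw [h2, sub_self]
    exact hk
  · exact h

lemma pvMinL_min (cv : String) (cs : List Char) (k : Int) (t : Nat) {l : Nat}
    (h : l < pvMinL cv cs k t) : k < pvN cv cs t - pvN cv cs l := by
  have := Nat.find_min (p := fun l => t ≤ l ∨ pvN cv cs t - pvN cv cs l ≤ k) ⟨t, Or.inl le_rfl⟩ h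
  push_neg at this
  exact this.2

lemma pvMinL_eq (cv : String) (cs : List Char) (k : Int) (t : Nat) {left : Nat}
    (h1 : left ≤ t) (h2 : pvN cv cs t - pvN cv cs left ≤ k)
    (h3 : ∀ l < left, k < pvN cv cs t - pvN cv cs l) :
    pvMinL cv cs k t = left := by
  refine le_antisymm (Nat.find_le (Or.inr h2)) ?_
  by_contra hlt
  push_neg at hlt
  rcases Nat.find_spec (p := fun l => t ≤ l ∨ pvN cv cs t - pvN cv cs l ≤ k) ⟨t, Or.inl le_rfl⟩ with h | h
  · have h4 : pvMinL cv cs k t ≤ t := Nat.find_le (Or.inl le_rfl)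
    rw [pvMinL] at h4 hlt
    omega
  · exact absurd h (not_le.mpr (h3 _ hlt))

lemma pvShrinkA_eq (cs : List Char) (cv : String) {k : Int} (hk : 0 ≤ k) (t : Nat)
    (ht : t ≤ cs.length) :
    ∀ fuel left nc, left ≤ t → nc = pvN cv cs t - pvN cv cs left →
      (∀ l < left, k < pvN cv cs t - pvN cv cs l) → t - left < fuel →
      pvShrinkA cs cv k fuel left nc = (pvMinL cv cs k t, pvN cv cs t - pvN cv cs (pvMinL cv cs k t)) := by
  intro fuel
  induction fuel with
  | zero => intro left nc _ _ _ hf; omega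
  | succ fuel ih =>
    intro left nc hle hnc hmin hf
    rw [pvShrinkA]
    by_cases hc : k < nc
    · rw [if_pos hc]
      have hlt : left < t := by
        rcases Nat.lt_or_ge left t with h | h
        · exact h
        · exfalso
          have : left = t := le_antisymm hle h
          subst this
          simp at hnc
          omega
      have hgl : PySem.List.pyGet? cs ((left : Nat) : Int) = some cs[left] :=
        PySem.List.pyGet?_ofNat cs left (by omega)
      have hstep : pvN cv cs (left + 1) = pvN cv cs left + (if pvIsSpecial cv cs[left] then 0 else 1) :=
        pvN_succ cv cs left (by omega)
      rw [hgl]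
      show pvShrinkA cs cv k fuel (left + 1)
          (if pvIsSpecial cv cs[left] then nc else nc - 1) = _
      have harg : (if pvIsSpecial cv cs[left] then nc else nc - 1)
           = pvN cv cs t - pvN cv cs (left + 1) := by
        split <;> simp_all <;> omega
      rw [harg]
      exact ih (left + 1) _ (by omega) rfl
        (by intro l hl
            rcases Nat.lt_or_ge l left with h | h
            · exact hmin l h
            · have : l = left := by omega
              subst this; omega)
        (by omega)
    · rw [if_neg hc]
      have heq : pvMinL cv cs k t = left :=
        pvMinL_eq cv cs k t hle (by omega) hmin
      rw [heq, hnc]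

lemma pvMinL_zero (cv : String) (cs : List Char) {k : Int} (hk : 0 ≤ k) :
    pvMinL cv cs k 0 = 0 :=
  pvMinL_eq cv cs k 0 le_rfl (by simp [pvN_zero]; exact hk) (by omega)

lemma pvM_zero (cv : String) (cs : List Char) {k : Int} (hk : 0 ≤ k) :
    pvM cv cs k 0 = 0 := by
  simp [pvM, pvMinL_zero cv cs hk]

lemma pvM_succ (cv : String) (cs : List Char) (k : Int) (t : Nat) :
    pvM cv cs k (t + 1) = max (pvM cv cs k t) ((t + 1 : Int) - (pvMinL cv cs k (t + 1) : Int)) := by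
  rw [pvM, pvM, List.range_succ, List.map_append, List.foldl_append]
  simp

lemma pvAloop (cs : List Char) (cv : String) {k : Int} (hk : 0 ≤ k) :
    ∀ t, t ≤ cs.length →
      (List.range t).foldl (pvStepA cs cv k) (0, 0, 0) =
        (pvMinL cv cs k t, pvN cv cs t - pvN cv cs (pvMinL cv cs k t), pvM cv cs k t) := by
  intro t
  induction t with
  | zero =>
    intro _
    simp [pvMinL_zero cv cs hk, pvM_zero cv cs hk, pvN_zero]
  | succ t ih =>
    intro ht
    have hlt : t < cs.length := by omega
    obtain ⟨c, hx⟩ : ∃ c, cs[t]? = some c :=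
      ⟨cs[t], List.getElem?_eq_getElem hlt⟩
    have hgt : PySem.List.pyGet? cs ((t : Nat) : Int) = some c := by
      rw [PySem.List.pyGet?_natCast, hx]
    rw [List.range_succ, List.foldl_append, List.foldl_cons, List.foldl_nil,
        ih (by omega)]
    simp only [pvStepA, hgt]
    have hml := pvMinL_le cv cs k t
    have hns := pvN_succ' cv cs t c hx
    have hnc1 : (if pvIsSpecial cv c then pvN cv cs t - pvN cv cs (pvMinL cv cs k t)
                 else pvN cv cs t - pvN cv cs (pvMinL cv cs k t) + 1)
        = pvN cv cs (t + 1) - pvN cv cs (pvMinL cv cs k t) := by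
      by_cases hsp : pvIsSpecial cv c = true
      · rw [if_pos hsp] at hns ⊢; omega
      · rw [if_neg hsp] at hns ⊢; omega
    have hshr : pvShrinkA cs cv k (cs.length + 1) (pvMinL cv cs k t)
          (pvN cv cs (t + 1) - pvN cv cs (pvMinL cv cs k t))
        = (pvMinL cv cs k (t + 1), pvN cv cs (t + 1) - pvN cv cs (pvMinL cv cs k (t + 1))) := by
      apply pvShrinkA_eq cs cv hk (t + 1) (by omega) _ _ _ (by omega) rfl _ (by omega)
      intro l hl
      have h1 := pvMinL_min cv cs k t hl
      have h2 := pvN_mono cv cs (Nat.le_succ t)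
      omega
    rw [hnc1, hshr]
    simp only [pvM_succ cv cs k t]
    refine Prod.ext rfl (Prod.ext rfl ?_)
    simp only []
    congr 1
    push_cast
    ring

lemma pvN_append (cv : String) (cs : List Char) (c : Char) {t : Nat} (h : t ≤ cs.length) :
    pvN cv (cs ++ [c]) t = pvN cv cs t := by
  rw [pvN, pvN, List.take_append_of_le_length h]

lemma pvN_append_last (cv : String) (cs : List Char) (c : Char) :
    pvN cv (cs ++ [c]) (cs.length + 1)
      = pvN cv cs cs.length + (if pvIsSpecial cv c then 0 else 1) := by
  rw [pvN, pvN, List.take_of_length_le (by simp), List.take_of_length_le le_rfl,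
      List.countP_append]
  split <;> simp_all [List.countP_cons]

lemma pvPref_eq (cv : String) (cs : List Char) :
    cs.foldl
      (fun pr c => pr ++ [PySem.List.pyGetD pr (-1) 0 + (if pvIsSpecial cv c then 0 else 1)])
      [(0 : Int)] = (List.range (cs.length + 1)).map (pvN cv cs) := by
  induction cs using List.reverseRecOn with
  | nil => simp [pvN]
  | append_singleton cs c ih =>
    rw [List.foldl_append, List.foldl_cons, List.foldl_nil, ih]
    have hlast : PySem.List.pyGetD ((List.range (cs.length + 1)).map (pvN cv cs)) (-1) 0
        = pvN cv cs cs.length := by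
      rw [List.range_succ, List.map_append]
      exact PySem.List.pyGetD_neg_one_append_singleton _ _ _
    rw [hlast]
    have hlen : (cs ++ [c]).length = cs.length + 1 := by simp
    rw [hlen, List.range_succ (n := cs.length + 1), List.map_append]
    congr 1
    · apply List.map_congr_left
      intro u hu
      rw [List.mem_range] at hu
      exact (pvN_append cv cs c (by omega)).symm
    · simp [pvN_append_last cv cs c]

lemma pvB_eq (cv : String) (cs : List Char) {k : Int} (hk : 0 ≤ k) :
    (match (List.range (cs.length + 1)).flatMap (fun r : Nat =>
        (List.range (r + 1)).filterMap (fun l : Nat =>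
          if PySem.List.pyGetD ((List.range (cs.length + 1)).map (pvN cv cs)) (r : Int) 0
             - PySem.List.pyGetD ((List.range (cs.length + 1)).map (pvN cv cs)) (l : Int) 0 ≤ k
          then some ((r : Int) - (l : Int)) else none)) with
     | [] => (0 : Int)
     | v :: vs => vs.foldl max v) = pvM cv cs k cs.length := by
  have hget : ∀ r : Nat, r < cs.length + 1 →
      PySem.List.pyGetD ((List.range (cs.length + 1)).map (pvN cv cs)) ((r : Nat) : Int) 0
        = pvN cv cs r := by
    intro r hr
    rw [PySem.List.pyGetD_natCast, List.getD_eq_getElem?_getD, List.getElem?_map,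
        List.getElem?_range hr]
    rfl
  set vals := (List.range (cs.length + 1)).flatMap (fun r : Nat =>
        (List.range (r + 1)).filterMap (fun l : Nat =>
          if PySem.List.pyGetD ((List.range (cs.length + 1)).map (pvN cv cs)) (r : Int) 0
             - PySem.List.pyGetD ((List.range (cs.length + 1)).map (pvN cv cs)) (l : Int) 0 ≤ k
          then some ((r : Int) - (l : Int)) else none)) with hvals
  have hmem : ∀ v : Int, v ∈ vals ↔
      ∃ r, r < cs.length + 1 ∧ ∃ l, l ≤ r ∧ pvN cv cs r - pvN cv cs l ≤ k
        ∧ (r : Int) - (l : Int) = v := by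
    intro v
    rw [hvals]
    simp only [List.mem_flatMap, List.mem_filterMap, List.mem_range]
    constructor
    · rintro ⟨r, hr, l, hl, heq⟩
      rw [hget r hr, hget l (by omega)] at heq
      split at heq
      · exact ⟨r, hr, l, by omega, by assumption, by injection heq⟩
      · cases heq
    · rintro ⟨r, hr, l, hl, hle, hveq⟩
      refine ⟨r, hr, l, by omega, ?_⟩
      rw [hget r hr, hget l (by omega), if_pos hle, hveq]
  have hg_mem : ∀ r : Nat, r < cs.length + 1 →
      (r : Int) - (pvMinL cv cs k r : Int) ∈ vals := by
    intro r hr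
    rw [hmem]
    exact ⟨r, hr, pvMinL cv cs k r, pvMinL_le cv cs k r, pvMinL_spec cv cs hk r, rfl⟩
  have hub : ∀ v ∈ vals, v ≤ pvM cv cs k cs.length := by
    intro v hv
    rw [hmem] at hv
    obtain ⟨r, hr, l, hl, hle, hveq⟩ := hv
    have hlm : pvMinL cv cs k r ≤ l := by
      by_contra hcon
      push_neg at hcon
      exact absurd hle (not_le.mpr (pvMinL_min cv cs k r hcon))
    have hterm : (r : Int) - (pvMinL cv cs k r : Int) ≤ pvM cv cs k cs.length := by
      refine (PySem.List.le_foldl_max _ 0).2 _ ?_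
      exact List.mem_map.mpr ⟨r, List.mem_range.mpr hr, rfl⟩
    omega
  have h0 : (0 : Int) ∈ vals := by
    rw [hmem]
    exact ⟨0, by omega, 0, le_rfl, by rw [sub_self]; exact hk, by simp⟩
  cases hv : vals with
  | nil => rw [hv] at h0; cases h0
  | cons v vs =>
    have hRub : vs.foldl max v ≤ pvM cv cs k cs.length := by
      rcases PySem.List.foldl_max_mem vs v with h | h
      · rw [h]
        exact hub v (by rw [hv]; exact List.mem_cons_self)
      · exact hub _ (by rw [hv]; exact List.mem_cons_of_mem v h)
    have hmemR : ∀ x : Int, x ∈ vals → x ≤ vs.foldl max v := by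
      intro x hx
      rw [hv] at hx
      rcases List.mem_cons.mp hx with h | h
      · exact h ▸ (PySem.List.le_foldl_max vs v).1
      · exact (PySem.List.le_foldl_max vs v).2 x h
    have hRlb : pvM cv cs k cs.length ≤ vs.foldl max v := by
      rcases PySem.List.foldl_max_mem
          ((List.range (cs.length + 1)).map (fun u : Nat => (u : Int) - (pvMinL cv cs k u : Int))) 0
          with h | h
      · rw [pvM, h]
        exact le_trans (le_refl 0) (hmemR 0 h0)
      · obtain ⟨r, hr, hrg⟩ := List.mem_map.mp h
        rw [List.mem_range] at hr
        rw [pvM, ← hrg]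
        exact hmemR _ (hg_mem r hr)
    show List.foldl max v vs = pvM cv cs k cs.length
    omega

-- ===== VERDICT (by name: the statement is the Claim_ definition above) =====
theorem longest_special_substring_spec : Claim_equal_longest_special_substring := by
  intro s cv k hdom hpre
  unfold Spec_longest_special_substring
  obtain ⟨hchars, hcase⟩ := hpre
  rcases hcase with hk | hnil
  · rw [longest_special_substring]
    rw [pvAloop s.toList cv hk s.toList.length le_rfl]
    show pvM cv s.toList k s.toList.length = _
    simp only [longest_special_substring_alt]
    rw [pvPref_eq cv s.toList]
    exact (pvB_eq cv s.toList hk).symm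
  · rw [longest_special_substring, longest_special_substring_alt]
    simp only [hnil, List.length_nil, List.range_zero, List.foldl_nil, List.foldl_cons]
    by_cases h0 : (0 : Int) ≤ k <;>
      simp [h0, PySem.List.pyGetD, PySem.List.pyGet?, PySem.List.pyIdx?]
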